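-- pv_equiv track=rewrite | github.com/adityabalaji97/cricket-data-thing | services/analytics_common.py | split_spells_by_gap
-- ===== SOURCE A (Python) =====
-- from typing import Dict, Iterable, List, Optional, Tuple
--
-- def split_spells_by_gap(overs: List[int], gap_threshold: int = 2) -> List[List[int]]:
--     """
--     Split sorted overs into spells where a new spell starts if gap > threshold.
--     """
--     if not overs:
--         return []
--     ordered = sorted(int(o) for o in overs)
--     spells: List[List[int]] = [[ordered[0]]]
--     for over in ordered[1:]:
--         if over - spells[-1][-1] > gap_threshold:
--             spells.append([over])
--         else:
--             spells[-1].append(over)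
--     return spells
-- ===== SOURCE B (Python) =====
-- from typing import List
--
-- def split_spells_by_gap(overs: List[int], gap_threshold: int = 2) -> List[List[int]]:
--     """Staged: sort, compute the cut indices where the gap exceeds the
--     threshold, then build the spells by slicing between consecutive cuts."""
--     ordered = sorted(int(o) for o in overs)
--     if not ordered:
--         return []
--     cuts = [0] + [i for i in range(1, len(ordered)) if ordered[i] - ordered[i - 1] > gap_threshold] + [len(ordered)]
--     return [ordered[a:b] for a, b in zip(cuts, cuts[1:])]
-- ===== Notes on version B (the rewrite author's own statement) =====
-- stated objective: alternative
-- what changed: B replaces A's incremental append-to-last-spell loop by a staged compute-boundaries-then-slice construction: one pass collects the cut indices where the gap exceeds the threshold, then the spells are the slices of the sorted list between consecutive cuts.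
import Mathlib
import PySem

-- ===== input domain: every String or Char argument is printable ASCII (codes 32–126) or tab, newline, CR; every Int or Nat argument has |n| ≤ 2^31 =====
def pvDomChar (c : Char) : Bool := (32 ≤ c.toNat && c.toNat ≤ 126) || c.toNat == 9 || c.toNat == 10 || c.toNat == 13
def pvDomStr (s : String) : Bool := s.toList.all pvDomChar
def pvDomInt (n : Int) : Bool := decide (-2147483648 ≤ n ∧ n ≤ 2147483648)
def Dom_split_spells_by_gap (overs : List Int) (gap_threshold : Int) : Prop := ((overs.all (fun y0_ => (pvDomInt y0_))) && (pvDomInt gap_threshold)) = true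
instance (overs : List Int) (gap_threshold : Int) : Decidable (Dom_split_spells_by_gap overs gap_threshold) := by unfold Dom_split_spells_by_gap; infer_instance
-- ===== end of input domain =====

-- B replaces A's incremental append-to-last-spell loop by a staged construction:
-- collect the cut indices where the gap exceeds the threshold, then slice the
-- sorted list between consecutive cuts; objective: alternative.

-- ===== PORT A =====
-- loop body: spells[-1][-1] is read with getLastD; spells is always a nonempty
-- list of nonempty lists at every iteration, so the defaults are never used.
def pyStepA (gap_threshold : Int) (spells : List (List Int)) (ov : Int) : List (List Int) :=
  if ov - ((spells.getLastD []).getLastD 0) > gap_threshold then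
    spells ++ [[ov]]
  else
    spells.dropLast ++ [(spells.getLastD []) ++ [ov]]

def split_spells_by_gap (overs : List Int) (gap_threshold : Int) : List (List Int) :=
  if overs = [] then []
  else
    -- ordered = sorted(int(o) for o in overs); int(o) is the identity on ints
    match PySem.List.sorted overs (fun x => x) false with
    | [] => []   -- unreachable: overs ≠ [] so the sorted list is nonempty
    | o0 :: rest => List.foldl (pyStepA gap_threshold) [[o0]] rest  -- spells=[[ordered[0]]]; loop over ordered[1:]

-- ===== PORT B =====
-- ordered[i] / ordered[i-1] inside the comprehension are ported with pyGetD;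
-- the indices drawn from range(1, len) are always in range, so the default 0 is never read.
-- The local variables 'cuts' and 'ordered' of Source B become the parameters of the
-- two helpers below (same values, same uses).
-- [ordered[a:b] for a, b in zip(cuts, cuts[1:])]
def pySlicesB (ordered cuts : List Int) : List (List Int) :=
  (cuts.zip (PySem.List.slice cuts (some 1) none)).map
    (fun ab => PySem.List.slice ordered (some ab.1) (some ab.2))

def pyBodyB (ordered : List Int) (gap_threshold : Int) : List (List Int) :=
  if ordered = [] then []
  else
    -- cuts = [0] + [i for i in range(1, len(ordered)) if ordered[i] - ordered[i-1] > gap_threshold] + [len(ordered)]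
    pySlicesB ordered
      ((0 : Int) ::
        ((PySem.List.pyRange 1 (ordered.length : Int) 1).filter
          (fun i => decide (PySem.List.pyGetD ordered i 0 - PySem.List.pyGetD ordered (i - 1) 0 > gap_threshold)))
        ++ [(ordered.length : Int)])

def split_spells_by_gap_alt (overs : List Int) (gap_threshold : Int) : List (List Int) :=
  -- ordered = sorted(int(o) for o in overs); int(o) is the identity on ints
  pyBodyB (PySem.List.sorted overs (fun x => x) false) gap_threshold

-- ===== PRECONDITION & SPEC =====
def Spec_split_spells_by_gap (overs : List Int) (gap_threshold : Int) (out : List (List Int)) : Prop := out = split_spells_by_gap_alt overs gap_threshold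
instance (overs : List Int) (gap_threshold : Int) (out : List (List Int)) : Decidable (Spec_split_spells_by_gap overs gap_threshold out) := by unfold Spec_split_spells_by_gap; infer_instance

-- ===== CLAIM (what is proved, stated in full; the proofs are below) =====
def Claim_equal_split_spells_by_gap : Prop := ∀ (overs : List Int) (gap_threshold : Int), Dom_split_spells_by_gap overs gap_threshold → Spec_split_spells_by_gap overs gap_threshold (split_spells_by_gap overs gap_threshold)

-- ===== LEMMAS AND PROOFS =====

/-- Common characterisation: given the previous element `prev`, split the rest of the
sorted list into (remainder of current spell, later spells). -/
def spellsGo (g : Int) (prev : Int) : List Int → List Int × List (List Int)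
  | [] => ([], [])
  | y :: ys =>
      let p := spellsGo g y ys
      if y - prev > g then ([], (y :: p.1) :: p.2) else (y :: p.1, p.2)

/-- A's loop, started on any nonempty accumulated last spell (with arbitrary
already-closed spells `S` before it), produces `spellsGo` of the remaining input. -/
lemma foldA_eq_spellsGo (g : Int) : ∀ (xs : List Int) (S : List (List Int)) (c : List Int) (a : Int),
    List.foldl (pyStepA g) (S ++ [c ++ [a]]) xs
      = S ++ ((c ++ [a]) ++ (spellsGo g a xs).1) :: (spellsGo g a xs).2 := by
  intro xs
  induction xs with
  | nil => intro S c a; simp [spellsGo]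
  | cons y ys ih =>
    intro S c a
    simp only [List.foldl_cons, pyStepA, List.getLastD_concat]
    by_cases h : y - a > g
    · rw [if_pos h]
      have h2 : (S ++ [c ++ [a]]) ++ [[y]] = (S ++ [c ++ [a]]) ++ [([] : List Int) ++ [y]] := by simp
      rw [h2, ih (S ++ [c ++ [a]]) [] y]
      simp [spellsGo, h]
    · rw [if_neg h, List.dropLast_concat, ih S (c ++ [a]) y]
      simp [spellsGo, h]

/-- The cut indices (as naturals) of the tail `xs`, the element before it being `prev`
at position `k - 1`. -/
def brksN (g prev : Int) (k : Nat) : List Int → List Nat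
  | [] => []
  | y :: ys => if y - prev > g then k :: brksN g y (k + 1) ys else brksN g y (k + 1) ys

lemma brksN_lb (g : Int) : ∀ (xs : List Int) (p : Int) (k m : Nat), m ∈ brksN g p k xs → k ≤ m := by
  intro xs
  induction xs with
  | nil => intro p k m h; simp [brksN] at h
  | cons y ys ih =>
    intro p k m h
    simp only [brksN] at h
    split_ifs at h with hc
    · rcases List.mem_cons.mp h with h | h
      · omega
      · have := ih y (k + 1) m h; omega
    · have := ih y (k + 1) m h; omega

/-- B's filtered range IS the cut list `brksN`. -/
lemma filt_eq_brksN (g : Int) : ∀ (xs ordered pre : List Int) (prev : Int),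
    ordered = pre ++ prev :: xs →
    (PySem.List.pyRange ((pre.length : Int) + 1) ((ordered.length : Int)) 1).filter
        (fun i => decide (PySem.List.pyGetD ordered i 0 - PySem.List.pyGetD ordered (i - 1) 0 > g))
      = (brksN g prev (pre.length + 1) xs).map Int.ofNat := by
  intro xs
  induction xs with
  | nil =>
    intro ordered pre prev h
    subst h
    rw [PySem.List.pyRange_one_eq_nil (by simp)]
    simp [brksN]
  | cons y ys ih =>
    intro ordered pre prev h
    have hlen : (ordered.length : Int) = (pre.length : Int) + 2 + ys.length := by
      subst h; simp; omega
    rw [PySem.List.pyRange_one_cons (by omega), List.filter_cons]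
    have hk : ((pre.length : Int) + 1) = ((pre.length + 1 : Nat) : Int) := by omega
    have hk' : ((pre.length : Int) + 1 - 1) = ((pre.length : Nat) : Int) := by omega
    have hgy : PySem.List.pyGetD ordered ((pre.length : Int) + 1) 0 = y := by
      rw [hk, PySem.List.pyGetD_natCast, h]
      rw [show pre ++ prev :: y :: ys = (pre ++ [prev]) ++ y :: ys by simp]
      rw [List.getD_eq_getElem?_getD, List.getElem?_append_right (by simp)]
      simp
    have hgp : PySem.List.pyGetD ordered ((pre.length : Int) + 1 - 1) 0 = prev := by
      rw [hk', PySem.List.pyGetD_natCast, h]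
      rw [List.getD_eq_getElem?_getD, List.getElem?_append_right (by simp)]
      simp
    rw [hgy, hgp]
    have hih := ih ordered (pre ++ [prev]) y (by simp [h])
    have hstart : ((pre ++ [prev]).length : Int) + 1 = (pre.length : Int) + 1 + 1 := by
      simp
    rw [hstart] at hih
    simp only [List.length_append, List.length_cons, List.length_nil, Nat.zero_add] at hih
    by_cases hc : y - prev > g
    · rw [if_pos (by simpa using hc)]
      rw [hih]
      simp only [brksN, if_pos hc, List.map_cons]
      congr 1
    · rw [if_neg (by simpa using hc)]
      rw [hih]
      simp only [brksN, if_neg hc]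

/-- Recursive form of "slice between consecutive cuts". -/
def sliceCuts (l : List Int) : List Nat → List (List Int)
  | a :: b :: rest => (List.take (b - a) (List.drop a l)) :: sliceCuts l (b :: rest)
  | _ => []

/-- B's zip-with-slices over a cast cut list computes `sliceCuts`. -/
lemma zip_slice_eq_sliceCuts (l : List Int) : ∀ (cs : List Nat),
    (((cs.map Int.ofNat).zip ((cs.map Int.ofNat).tail)).map
        (fun ab => PySem.List.slice l (some ab.1) (some ab.2)))
      = sliceCuts l cs := by
  intro cs
  induction cs with
  | nil => simp [sliceCuts]
  | cons a cs ih =>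
    cases cs with
    | nil => rfl
    | cons b rest =>
      simp only [List.map_cons, List.tail_cons, List.zip_cons_cons] at ih ⊢
      rw [ih]
      simp only [sliceCuts]
      congr 1
      simp [Int.ofNat_eq_natCast, PySem.List.slice_natCast]

/-- Slicing the sorted list between the cut points yields exactly the spells of
`spellsGo`. -/
lemma sliceCuts_eq_spells (g : Int) : ∀ (xs ordered pre : List Int) (prev : Int),
    ordered = pre ++ prev :: xs →
    sliceCuts ordered (pre.length :: (brksN g prev (pre.length + 1) xs ++ [ordered.length]))
      = (prev :: (spellsGo g prev xs).1) :: (spellsGo g prev xs).2 := by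
  intro xs
  induction xs with
  | nil =>
    intro ordered pre prev h
    have hd : List.drop pre.length ordered = [prev] := by rw [h]; exact List.drop_left
    have hl : ordered.length = pre.length + 1 := by simp [h]
    simp [brksN, sliceCuts, hd, hl, spellsGo]
  | cons y ys ih =>
    intro ordered pre prev h
    have hd : List.drop pre.length ordered = prev :: y :: ys := by rw [h]; exact List.drop_left
    have hd1 : List.drop (pre.length + 1) ordered = y :: ys := by
      rw [show pre.length + 1 = (pre ++ [prev]).length by simp, h,
        show pre ++ prev :: y :: ys = (pre ++ [prev]) ++ y :: ys by simp]
      exact List.drop_left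
    have hlen : ordered.length = pre.length + 2 + ys.length := by simp [h]; omega
    have hih := ih ordered (pre ++ [prev]) y (by simp [h])
    simp only [List.length_append, List.length_cons, List.length_nil, Nat.zero_add] at hih
    by_cases hc : y - prev > g
    · simp only [brksN, if_pos hc]
      show sliceCuts ordered (pre.length :: (pre.length + 1) :: (brksN g y (pre.length + 1 + 1) ys ++ [ordered.length])) = _
      simp only [sliceCuts]
      rw [hih]
      have : pre.length + 1 - pre.length = 1 := by omega
      simp [spellsGo, hc, this, hd]
    · simp only [brksN, if_neg hc]
      -- the first cut after pre.length is the head of brksN … ++ [len], which is ≥ pre.length + 2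
      rcases hT : brksN g y (pre.length + 1 + 1) ys ++ [ordered.length] with _ | ⟨h₁, T'⟩
      · exact absurd hT (by simp)
      have hh₁ : pre.length + 2 ≤ h₁ := by
        rcases hB : brksN g y (pre.length + 1 + 1) ys with _ | ⟨b0, B'⟩
        · rw [hB] at hT; simp at hT; omega
        · rw [hB] at hT; simp at hT
          have : pre.length + 1 + 1 ≤ b0 := brksN_lb g ys y _ b0 (by rw [hB]; exact List.mem_cons_self)
          omega
      rw [hT] at hih
      simp only [sliceCuts] at hih
      have h1 : List.take (h₁ - (pre.length + 1)) (List.drop (pre.length + 1) ordered)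
          = y :: (spellsGo g y ys).1 := (List.cons.inj hih).1
      have h2 : sliceCuts ordered (h₁ :: T') = (spellsGo g y ys).2 := (List.cons.inj hih).2
      have h3 : List.take (h₁ - pre.length) (List.drop pre.length ordered)
          = prev :: (y :: (spellsGo g y ys).1) := by
        rw [hd, show h₁ - pre.length = (h₁ - (pre.length + 1)) + 1 by omega, List.take_succ_cons]
        rw [← h1, hd1]
      simp only [sliceCuts]
      rw [h3, h2]
      simp [spellsGo, hc]

/-- The two ports agree. -/
lemma split_eq_spec (overs : List Int) (g : Int) :
    split_spells_by_gap overs g = split_spells_by_gap_alt overs g := by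
  unfold split_spells_by_gap split_spells_by_gap_alt pyBodyB pySlicesB
  by_cases h : overs = []
  · subst h
    rw [if_pos rfl]
    have hs : PySem.List.sorted ([] : List Int) (fun x => x) false = [] := by decide
    simp [hs]
  · rw [if_neg h]
    cases hs : PySem.List.sorted overs (fun x => x) false with
    | nil => simp
    | cons o0 rest =>
      rw [if_neg (by simp)]
      show List.foldl (pyStepA g) [[o0]] rest = _
      -- A side
      have hA := foldA_eq_spellsGo g rest [] [] o0
      simp only [List.nil_append] at hA
      rw [hA]
      -- B side: identify the filtered range with brksN
      have hF := filt_eq_brksN g rest (o0 :: rest) [] o0 rfl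
      simp only [List.length_nil, Nat.cast_zero, zero_add] at hF
      rw [hF, PySem.List.slice_from_one]
      have hcast : (0 : Int) :: (brksN g o0 (0 + 1) rest).map Int.ofNat
            ++ [((o0 :: rest).length : Int)]
          = ((0 :: (brksN g o0 (0 + 1) rest ++ [(o0 :: rest).length])).map Int.ofNat) := by
        simp [Int.ofNat_eq_natCast]
      rw [hcast, zip_slice_eq_sliceCuts]
      have hS := sliceCuts_eq_spells g rest (o0 :: rest) [] o0 rfl
      simp only [List.length_nil] at hS
      rw [hS]
      simp

-- ===== VERDICT (by name: the statement is the Claim_ definition above) =====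
theorem split_spells_by_gap_spec : Claim_equal_split_spells_by_gap := by
  intro overs g _
  unfold Spec_split_spells_by_gap
  exact split_eq_spec overs g
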